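-- pv_equiv track=rewrite | github.com/lenartkovac/aoc2022 | day8/solution.py | tallest_tree
-- ===== SOURCE A (Python) =====
-- def tallest_tree(matrix):
--     res = []
--     for row in matrix:
--         max_val = -1
--         arr = []
--         for val in row:
--             if val > max_val:
--                 max_val = val
--                 arr.append(True)
--             else:
--                 arr.append(False)
--         res.append(arr)
--     return res
-- ===== SOURCE B (Python) =====
-- def tallest_tree(matrix):
--     res = []
--     for row in matrix:
--         # pass 1: prefix-maximum table pm, pm[i] = max(-1, row[0..i-1])
--         pm = []
--         cur = -1
--         for v in row:
--             pm.append(cur)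
--             cur = v if v > cur else cur
--         # pass 2: elementwise strict comparison
--         res.append([v > p for v, p in zip(row, pm)])
--     return res
-- ===== Notes on version B (the rewrite author's own statement) =====
-- stated objective: alternative
-- what changed: B splits each row into two passes: it first builds a prefix-maximum table (with the -1 sentinel), then produces the boolean row by an elementwise strict comparison via zip, instead of A's single loop maintaining a scalar running max and appending booleans inline.
import Mathlib
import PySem

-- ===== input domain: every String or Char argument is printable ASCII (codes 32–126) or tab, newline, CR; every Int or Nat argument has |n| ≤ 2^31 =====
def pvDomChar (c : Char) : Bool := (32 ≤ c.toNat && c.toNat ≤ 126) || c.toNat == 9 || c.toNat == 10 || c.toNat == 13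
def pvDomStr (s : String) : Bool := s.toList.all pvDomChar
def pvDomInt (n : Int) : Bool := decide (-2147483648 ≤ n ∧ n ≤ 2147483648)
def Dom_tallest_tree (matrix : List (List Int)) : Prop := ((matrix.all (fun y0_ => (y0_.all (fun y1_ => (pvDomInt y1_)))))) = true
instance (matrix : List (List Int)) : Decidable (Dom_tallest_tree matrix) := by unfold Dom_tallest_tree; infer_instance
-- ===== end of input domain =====

-- ===== PORT A =====
-- B changes only the per-row decomposition (prefix-max table + zip vs inline running max); same return value.
def tallest_tree (matrix : List (List Int)) : List (List Bool) :=
  matrix.foldl (fun res row =>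
    res ++ [((row.foldl (fun (st : Int × List Bool) v =>
        if v > st.1 then (v, st.2 ++ [true]) else (st.1, st.2 ++ [false]))
      ((-1 : Int), ([] : List Bool))).2)]) []

-- ===== PORT B =====
-- pass 1 of Source B: build the prefix-max table pm (state: (pm, cur))
def pvBuildPM (row : List Int) : List Int :=
  (row.foldl (fun (st : List Int × Int) v =>
      (st.1 ++ [st.2], if v > st.2 then v else st.2))
    (([] : List Int), (-1 : Int))).1

def tallest_tree_alt (matrix : List (List Int)) : List (List Bool) :=
  matrix.foldl (fun res row =>
    res ++ [((row.zip (pvBuildPM row)).map (fun vp => decide (vp.1 > vp.2)))]) []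

-- ===== PRECONDITION & SPEC =====
def Spec_tallest_tree (matrix : List (List Int)) (out : List (List Bool)) : Prop := out = tallest_tree_alt matrix
instance (matrix : List (List Int)) (out : List (List Bool)) : Decidable (Spec_tallest_tree matrix out) := by unfold Spec_tallest_tree; infer_instance

-- ===== CLAIM (what is proved, stated in full; the proofs are below) =====
def Claim_equal_tallest_tree : Prop := ∀ (matrix : List (List Int)), Dom_tallest_tree matrix → Spec_tallest_tree matrix (tallest_tree matrix)

-- ===== LEMMAS AND PROOFS =====

-- abstract prefix-max list used only by the proofs
def pvPM (m : Int) : List Int → List Int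
  | [] => []
  | v :: vs => m :: pvPM (if v > m then v else m) vs

theorem pvBuildPM_fold (vs : List Int) : ∀ (pm : List Int) (cur : Int),
    (vs.foldl (fun (st : List Int × Int) v =>
        (st.1 ++ [st.2], if v > st.2 then v else st.2)) (pm, cur)).1
      = pm ++ pvPM cur vs := by
  induction vs with
  | nil => intro pm cur; simp [pvPM]
  | cons v vs ih =>
      intro pm cur
      simp only [List.foldl_cons, ih, pvPM, List.append_assoc, List.singleton_append]

theorem pvBuildPM_eq (row : List Int) : pvBuildPM row = pvPM (-1) row := by
  simpa using pvBuildPM_fold row [] (-1)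

theorem pvRow_fold (row : List Int) : ∀ (m : Int) (acc : List Bool),
    (row.foldl (fun (st : Int × List Bool) v =>
        if v > st.1 then (v, st.2 ++ [true]) else (st.1, st.2 ++ [false])) (m, acc)).2
      = acc ++ (row.zip (pvPM m row)).map (fun vp => decide (vp.1 > vp.2)) := by
  induction row with
  | nil => intro m acc; simp [pvPM]
  | cons v vs ih =>
      intro m acc
      by_cases h : v > m
      · simp [pvPM, h, ih, List.append_assoc]
      · simp [pvPM, h, ih, List.append_assoc]

-- ===== VERDICT (by name: the statement is the Claim_ definition above) =====
theorem tallest_tree_spec : Claim_equal_tallest_tree := by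
  intro matrix _
  unfold Spec_tallest_tree tallest_tree tallest_tree_alt
  induction matrix using List.reverseRecOn with
  | nil => rfl
  | append_singleton ms row ih =>
      simp only [List.foldl_append, List.foldl_cons, List.foldl_nil,
        pvBuildPM_eq, pvRow_fold, List.nil_append]
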